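-- pv_equiv track=rewrite | github.com/erri4/wslshare | luma/luma.py | termisclosed
-- ===== SOURCE A (Python) =====
-- def termisclosed(term):
--     stack = []
--     opening = {'(': ')', '{': '}', '[': ']'}
--     closing = {')', '}', ']'}
--     in_quotes = False
--
--     i = 0
--     while i < len(term):
--         char = term[i]
--
--         if char == '"':
--             in_quotes = not in_quotes
--
--         elif not in_quotes:
--             if char in opening:
--                 stack.append(char)
--             elif char in closing:
--                 if not stack:
--                     return False
--                 last = stack.pop()
--                 if opening[last] != char:
--                     return False
--
--         i += 1
--
--     return not in_quotes and not stack
-- ===== SOURCE B (Python) =====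
-- def termisclosed(term):
--     parts = term.split('"')
--     if len(parts) % 2 == 0:        # odd number of quote chars -> unterminated quote
--         return False
--     pairs = {')': '(', '}': '{', ']': '['}
--     stack = []
--     for ch in ''.join(parts[0::2]):    # only the segments outside quotes
--         if ch in '({[':
--             stack.append(ch)
--         elif ch in pairs:
--             if not stack or stack.pop() != pairs[ch]:
--                 return False
--     return not stack
-- ===== Notes on version B (the rewrite author's own statement) =====
-- stated objective: faster
-- what changed: B replaces A's fused per-character pass with a quote-toggle flag by a partition step: split the string on the quote character, reject an even part count (unterminated quote), then run a plain stack-based bracket matcher over the joined outside-quote segments using a closer-to-opener dict.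
import Mathlib
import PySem

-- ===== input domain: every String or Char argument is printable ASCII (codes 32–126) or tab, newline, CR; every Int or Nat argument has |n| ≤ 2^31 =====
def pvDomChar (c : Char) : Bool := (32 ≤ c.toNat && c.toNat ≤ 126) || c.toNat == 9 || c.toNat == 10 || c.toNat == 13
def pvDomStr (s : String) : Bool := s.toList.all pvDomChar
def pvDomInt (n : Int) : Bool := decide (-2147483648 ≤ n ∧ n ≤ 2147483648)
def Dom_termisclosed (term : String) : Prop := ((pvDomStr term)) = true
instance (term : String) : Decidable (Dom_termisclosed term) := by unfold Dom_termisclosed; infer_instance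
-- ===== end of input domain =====

-- B replaces A's fused single pass (quote flag + bracket stack) by a partition step:
-- split on the quote character, reject an even part count, then a plain stack scan of
-- the segments outside quotes; equal return value on every input, measured faster
-- (C-level split/join replaces most of the per-character Python loop).

-- ===== PORT A =====
-- A's dict `opening = {'(': ')', '{': '}', '[': ']'}`: lookup in the dict (none = key absent)
def pvOpeningA (c : Char) : Option Char :=
  if c = '(' then some ')' else if c = '{' then some '}' else if c = '[' then some ']' else none

-- A's while-loop over the characters; state = (in_quotes, stack); none = early `return False`
def termAloop : List Char → Bool → List Char → Option (Bool × List Char)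
  | [], q, st => some (q, st)
  | c :: cs, q, st =>
    if c = '"' then termAloop cs (!q) st
    else if !q then
      if (pvOpeningA c).isSome then termAloop cs q (c :: st)
      else if c = ')' ∨ c = '}' ∨ c = ']' then
        match st with
        | [] => none
        | last :: rest =>
          if (pvOpeningA last).getD ' ' ≠ c then none
          else termAloop cs q rest
      else termAloop cs q st
    else termAloop cs q st

def termisclosed (term : String) : Bool :=
  match termAloop term.toList false [] with
  | none => false
  | some (q, st) => !q && st.isEmpty

-- ===== PORT B =====
-- term.split('"') on the character list
def splitQ : List Char → List (List Char)
  | [] => [[]]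
  | c :: cs =>
    if c = '"' then [] :: splitQ cs
    else
      match splitQ cs with
      | p :: ps => (c :: p) :: ps
      | [] => [[c]]

-- parts[0::2]
def evensQ : List (List Char) → List (List Char)
  | [] => []
  | [x] => [x]
  | x :: _ :: rest => x :: evensQ rest

-- B's pairs dict lookup: pairs = {')': '(', '}': '{', ']': '['}
def pairOfB (c : Char) : Char :=
  if c = ')' then '(' else if c = '}' then '{' else '['

-- B's for-loop over the joined outside-quote segments; none = early `return False`
def scanB : List Char → List Char → Option (List Char)
  | [], st => some st
  | c :: cs, st =>
    if c = '(' ∨ c = '{' ∨ c = '[' then scanB cs (c :: st)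
    else if c = ')' ∨ c = '}' ∨ c = ']' then
      match st with
      | [] => none
      | top :: rest => if top ≠ pairOfB c then none else scanB cs rest
    else scanB cs st

def termisclosed_alt (term : String) : Bool :=
  let parts := splitQ term.toList
  if parts.length % 2 = 0 then false
  else
    match scanB (evensQ parts).flatten [] with
    | none => false
    | some st => st.isEmpty

-- ===== PRECONDITION & SPEC =====
def Spec_termisclosed (term : String) (out : Bool) : Prop := out = termisclosed_alt term
instance (term : String) (out : Bool) : Decidable (Spec_termisclosed term out) := by unfold Spec_termisclosed; infer_instance

-- ===== CLAIM (what is proved, stated in full; the proofs are below) =====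
def Claim_equal_termisclosed : Prop := ∀ (term : String), Dom_termisclosed term → Spec_termisclosed term (termisclosed term)

-- ===== LEMMAS AND PROOFS =====

def wrapQ (b : Bool) : Option (List Char) → Option (Bool × List Char)
  | none => none
  | some st => some (b, st)

lemma splitQ_ne_nil (cs : List Char) : splitQ cs ≠ [] := by
  cases cs with
  | nil => simp [splitQ]
  | cons c cs =>
    simp only [splitQ]
    split
    · simp
    · rcases h : splitQ cs with _ | ⟨p, ps⟩ <;> simp

lemma flatten_evens_cons (c : Char) (p : List Char) (ps : List (List Char)) :
    (evensQ ((c :: p) :: ps)).flatten = c :: (evensQ (p :: ps)).flatten := by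
  cases ps <;> simp [evensQ]

lemma parity_succ (n : ℕ) : (decide ((n + 1) % 2 = 0) : Bool) = decide (n % 2 = 1) := by
  rcases Nat.mod_two_eq_zero_or_one n with h | h <;> simp [Nat.add_mod, h]

-- the two closer-comparisons agree for every stack top, given c is a closer
lemma cmp_agree (c top : Char) (h : c = ')' ∨ c = '}' ∨ c = ']') :
    ((pvOpeningA top).getD ' ' ≠ c) ↔ (top ≠ pairOfB c) := by
  rcases h with h | h | h <;> subst h <;>
    by_cases h1 : top = '(' <;> by_cases h2 : top = '{' <;> by_cases h3 : top = '[' <;>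
    simp_all [pvOpeningA, pairOfB]

lemma opener_agree (c : Char) :
    (pvOpeningA c).isSome = true ↔ (c = '(' ∨ c = '{' ∨ c = '[') := by
  by_cases h1 : c = '(' <;> by_cases h2 : c = '{' <;> by_cases h3 : c = '[' <;> simp_all [pvOpeningA]

lemma termAloop_eq (cs : List Char) :
    (∀ st, termAloop cs false st
        = wrapQ (decide ((splitQ cs).length % 2 = 0)) (scanB (evensQ (splitQ cs)).flatten st)) ∧
    (∀ st, termAloop cs true st
        = wrapQ (decide ((splitQ cs).length % 2 = 1)) (scanB (evensQ ((splitQ cs).tail)).flatten st)) := by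
  induction cs with
  | nil => constructor <;> intro st <;> simp [termAloop, splitQ, evensQ, scanB, wrapQ]
  | cons c cs ih =>
    obtain ⟨ih0, ih1⟩ := ih
    by_cases hq : c = '"'
    · subst hq
      constructor <;> intro st
      · -- false, toggles to true
        rw [show termAloop ('"' :: cs) false st = termAloop cs true st from by simp [termAloop],
            ih1]
        simp only [splitQ, if_true, List.length_cons]
        rw [parity_succ]
        congr 2
        rcases h : splitQ cs with _ | ⟨p, ps⟩
        · exact absurd h (splitQ_ne_nil cs)
        · cases ps <;> simp [evensQ]
      · rw [show termAloop ('"' :: cs) true st = termAloop cs false st from by simp [termAloop],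
            ih0]
        simp only [splitQ, if_true, List.length_cons]
        congr 2
        rcases Nat.mod_two_eq_zero_or_one (splitQ cs).length with h | h <;>
          simp [Nat.add_mod, h]
    · -- c is not a quote: splitQ (c :: cs) = (c :: p) :: ps
      rcases hsp : splitQ cs with _ | ⟨p, ps⟩
      · exact absurd hsp (splitQ_ne_nil cs)
      have hsc : splitQ (c :: cs) = (c :: p) :: ps := by simp [splitQ, hq, hsp]
      constructor <;> intro st
      · -- in_quotes = false
        rw [hsc, flatten_evens_cons, ← hsp]
        by_cases hop : c = '(' ∨ c = '{' ∨ c = '['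
        · have hA : (pvOpeningA c).isSome = true := (opener_agree c).mpr hop
          have hncl : ¬ (c = ')' ∨ c = '}' ∨ c = ']') := by
            rcases hop with h | h | h <;> subst h <;> decide
          rw [show termAloop (c :: cs) false st = termAloop cs false (c :: st) from by
                simp [termAloop, hq, hA], ih0]
          have : scanB (c :: (evensQ (splitQ cs)).flatten) st
              = scanB (evensQ (splitQ cs)).flatten (c :: st) := by
            simp [scanB, hop]
          rw [this]
          congr 2; rw [hsp]; simp
        · have hA : (pvOpeningA c).isSome = false := by
            rcases hA : (pvOpeningA c).isSome with _ | _
            · rfl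
            · exact absurd ((opener_agree c).mp hA) hop
          by_cases hcl : c = ')' ∨ c = '}' ∨ c = ']'
          · -- closer
            have hlhs : termAloop (c :: cs) false st
                = (match st with
                   | [] => none
                   | last :: rest =>
                     if (pvOpeningA last).getD ' ' ≠ c then none
                     else termAloop cs false rest) := by
              simp [termAloop, hq, hA, hcl]
            have hrhs : scanB (c :: (evensQ (splitQ cs)).flatten) st
                = (match st with
                   | [] => none
                   | top :: rest => if top ≠ pairOfB c then none
                                    else scanB (evensQ (splitQ cs)).flatten rest) := by
              have hnop : ¬ (c = '(' ∨ c = '{' ∨ c = '[') := hop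
              simp only [scanB, if_neg hnop, if_pos hcl]
              cases st <;> rfl
            rw [hlhs, hrhs]
            rcases st with _ | ⟨top, rest⟩
            · simp [wrapQ]
            · by_cases hcmp : top = pairOfB c
              · have : ¬ ((pvOpeningA top).getD ' ' ≠ c) := by
                  rw [cmp_agree c top hcl]; simp [hcmp]
                simp only [if_neg this, if_neg (by simp [hcmp] : ¬ top ≠ pairOfB c)]
                rw [ih0]
                congr 2; rw [hsp]; simp
              · have : (pvOpeningA top).getD ' ' ≠ c := by
                  rw [cmp_agree c top hcl]; exact hcmp
                simp [this, hcmp, wrapQ]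
          · -- neither opener nor closer
            rw [show termAloop (c :: cs) false st = termAloop cs false st from by
                  simp [termAloop, hq, hA, hcl], ih0]
            have : scanB (c :: (evensQ (splitQ cs)).flatten) st
                = scanB (evensQ (splitQ cs)).flatten st := by
              simp [scanB, hop, hcl]
            rw [this]
            congr 2; rw [hsp]; simp
      · -- in_quotes = true, c skipped
        rw [show termAloop (c :: cs) true st = termAloop cs true st from by
              simp [termAloop, hq], ih1, hsc]
        congr 2 <;> rw [hsp] <;> simp

-- ===== VERDICT (by name: the statement is the Claim_ definition above) =====
theorem termisclosed_spec : Claim_equal_termisclosed := by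
  intro term _
  unfold Spec_termisclosed termisclosed termisclosed_alt
  rw [(termAloop_eq term.toList).1 []]
  rcases Nat.mod_two_eq_zero_or_one (splitQ term.toList).length with h | h <;>
    rcases hs : scanB (evensQ (splitQ term.toList)).flatten [] with _ | st <;>
    simp [wrapQ, h, hs]
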